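-- pv_equiv track=rewrite | github.com/Hideki-1029/dolce-qd-experiment-2025 | plot_all_centroid_ave.py | extract_last4_digits
-- ===== SOURCE A (Python) =====
-- def extract_last4_digits(stem: str) -> int | None:
--     """Extract last 4 digits from a filename stem, return as int or None."""
--     digits = "".join(ch for ch in stem if ch.isdigit())
--     if not digits:
--         return None
--     last4 = digits[-4:]
--     try:
--         return int(last4)
--     except ValueError:
--         return None
-- ===== SOURCE B (Python) =====
-- def extract_last4_digits(stem: str) -> int | None:
--     """Extract last 4 digits from a filename stem, return as int or None."""
--     buf = []
--     for ch in reversed(stem):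
--         if ch.isdigit():
--             buf.append(ch)
--             if len(buf) == 4:
--                 break
--     if not buf:
--         return None
--     return int("".join(reversed(buf)))
-- ===== Notes on version B (the rewrite author's own statement) =====
-- stated objective: alternative
-- what changed: Replaces the full forward digit-filter plus slice with a backward scan that collects at most four digits and breaks early, then reverses the small buffer.
import Mathlib
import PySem

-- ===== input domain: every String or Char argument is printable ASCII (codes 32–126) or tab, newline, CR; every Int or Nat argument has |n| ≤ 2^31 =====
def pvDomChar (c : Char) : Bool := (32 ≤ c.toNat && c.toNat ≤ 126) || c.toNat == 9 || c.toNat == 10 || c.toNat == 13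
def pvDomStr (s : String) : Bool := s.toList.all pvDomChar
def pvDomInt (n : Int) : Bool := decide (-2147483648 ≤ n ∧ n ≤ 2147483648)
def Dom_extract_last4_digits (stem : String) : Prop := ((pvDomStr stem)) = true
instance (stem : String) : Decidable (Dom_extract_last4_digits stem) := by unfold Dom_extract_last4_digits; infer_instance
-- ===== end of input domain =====

-- B scans the stem backward collecting at most four digit characters with an early break,
-- instead of filtering all digits forward and slicing the last four (objective: alternative).


-- ===== PORT A =====
def extract_last4_digits (stem : String) : Option Int :=
  let digits := stem.toList.filter PySem.Chars.isdigit
  if digits = [] then none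
  else
    let last4 := PySem.List.slice digits (some (-4)) none
    match PySem.Int.ofChars? last4 with   -- int(last4); ValueError → none branch
    | some n => some n
    | none => none

-- ===== PORT B =====
-- the backward loop: walk reversed(stem), append digits to buf, break at 4
def pvRevScan : List Char → List Char → List Char
  | [], buf => buf
  | ch :: rest, buf =>
    if PySem.Chars.isdigit ch then
      let buf' := buf ++ [ch]
      if buf'.length = 4 then buf' else pvRevScan rest buf'
    else pvRevScan rest buf

def extract_last4_digits_alt (stem : String) : Option Int :=
  let buf := pvRevScan stem.toList.reverse []
  if buf = [] then none
  else PySem.Int.ofChars? buf.reverse   -- int("".join(reversed(buf)))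

-- ===== PRECONDITION & SPEC =====
def Spec_extract_last4_digits (stem : String) (out : Option Int) : Prop := out = extract_last4_digits_alt stem
instance (stem : String) (out : Option Int) : Decidable (Spec_extract_last4_digits stem out) := by unfold Spec_extract_last4_digits; infer_instance

-- ===== CLAIM (what is proved, stated in full; the proofs are below) =====
def Claim_equal_extract_last4_digits : Prop := ∀ (stem : String), Dom_extract_last4_digits stem → Spec_extract_last4_digits stem (extract_last4_digits stem)

-- ===== LEMMAS AND PROOFS =====

-- B's backward loop collects exactly the first (4 - |buf|) digits of the remaining reversed input.
theorem pvRevScan_eq (l : List Char) : ∀ buf : List Char, buf.length < 4 →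
    pvRevScan l buf = buf ++ (l.filter PySem.Chars.isdigit).take (4 - buf.length) := by
  induction l with
  | nil => intro buf _; simp [pvRevScan]
  | cons c rest ih =>
    intro buf h
    by_cases hd : PySem.Chars.isdigit c
    · simp only [pvRevScan, hd, if_true]
      by_cases h4 : (buf ++ [c]).length = 4
      · have hb3 : buf.length = 3 := by simp at h4; omega
        simp [h4, List.filter_cons, hd, hb3]
      · have hlt : (buf ++ [c]).length < 4 := by simp at h4 ⊢; omega
        rw [if_neg h4, ih _ hlt]
        have hs : 4 - buf.length = (4 - (buf ++ [c]).length) + 1 := by simp at h4 ⊢; omega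
        simp [List.filter_cons, hd, hs, List.take_succ_cons]
    · simp only [pvRevScan, hd, if_false]
      rw [ih _ h]
      simp [List.filter_cons, hd]

-- ===== VERDICT (by name: the statement is the Claim_ definition above) =====
theorem extract_last4_digits_spec : Claim_equal_extract_last4_digits := by
  unfold Claim_equal_extract_last4_digits Spec_extract_last4_digits
  intro stem _
  unfold extract_last4_digits extract_last4_digits_alt
  rw [pvRevScan_eq _ [] (by simp)]
  simp only [List.nil_append, List.length_nil, Nat.sub_zero, List.filter_reverse, List.take_reverse,
    List.reverse_reverse]
  set digits := stem.toList.filter PySem.Chars.isdigit with hdig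
  rw [PySem.List.slice_from_neg_ofNat digits 4 (by omega)]
  by_cases hnil : digits = []
  · simp [hnil]
  · have h1 : (List.drop (digits.length - 4) digits).reverse ≠ [] := by
      have h0 : 0 < digits.length := List.length_pos_of_ne_nil hnil
      simp
      omega
    rw [if_neg hnil, if_neg h1]
    cases PySem.Int.ofChars? (List.drop (digits.length - 4) digits) <;> rfl
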